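-- pv_equiv track=rewrite | github.com/EH-GD-MOHIT21/vision11 | Cricket-Fantasy-main/methods/catches.py | catches
-- ===== SOURCE A (Python) =====
-- def catches(battingInfo):
--     outInfo = []
--     for p in battingInfo:
--         if p != 'not out':
--             outInfo.append(p)
--
--     removedC = []
--     for o in outInfo:
--         try:
--             removedC.append(o.split('c ')[1])
--         except IndexError:
--             removedC.append(o.split('c ')[0])
--
--     removedB = []
--     for c in removedC:
--         removedB.append(c.split('b ')[0])
--     removedB = [b.strip(' ') for b in removedB]
--
--     catchesTakenBy = []
--     for b in removedB:
--         if 'run out' not in b and 'lbw' not in b and 'and' not in b: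
--             catchesTakenBy.append(b)
--
--     catchesTakenBy = [x for x in catchesTakenBy if x != '']
--     catchesTakenBy = [x for x in catchesTakenBy if len(x) > 1]
--     catchesTakenBy = [x.replace('(sub)', '') for x in catchesTakenBy]
--
--     return catchesTakenBy
-- ===== SOURCE B (Python) =====
-- def catches(battingInfo):
--     out = []
--     for p in battingInfo:
--         if p == 'not out':
--             continue
--         # locate the fielder's name by index arithmetic instead of building split lists:
--         # the text between the first 'c ' and the next 'c ' (if any), cut at the first 'b '
--         i = p.find('c ')
--         s = p[i + 2:] if i >= 0 else p
--         j = s.find('c ')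
--         if j >= 0:
--             s = s[:j]
--         k = s.find('b ')
--         if k >= 0:
--             s = s[:k]
--         s = s.strip(' ')
--         if 'run out' in s or 'lbw' in s or 'and' in s or len(s) <= 1:
--             continue
--         out.append(s.replace('(sub)', ''))
--     return out
-- ===== Notes on version B (the rewrite author's own statement) =====
-- stated objective: faster
-- what changed: A materializes six intermediate lists by repeatedly calling str.split and filtering them in six sequential passes; B never builds split lists: it locates the cut points by index arithmetic (str.find plus slicing between the first 'c ', the following 'c ' and the first 'b ') and emits the result in a single pass.
import Mathlib
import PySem

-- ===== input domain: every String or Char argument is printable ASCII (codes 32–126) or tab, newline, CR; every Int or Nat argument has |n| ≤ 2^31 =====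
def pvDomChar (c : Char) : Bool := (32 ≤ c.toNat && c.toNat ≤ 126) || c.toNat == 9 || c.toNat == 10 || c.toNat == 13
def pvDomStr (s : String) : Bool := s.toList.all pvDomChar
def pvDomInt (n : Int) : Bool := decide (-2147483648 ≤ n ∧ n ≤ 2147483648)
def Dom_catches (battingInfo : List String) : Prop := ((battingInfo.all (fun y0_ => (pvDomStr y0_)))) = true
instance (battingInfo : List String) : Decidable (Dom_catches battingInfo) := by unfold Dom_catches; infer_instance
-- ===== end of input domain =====

set_option maxHeartbeats 1000000

-- B extracts the fielder's name by index arithmetic (str.find + slicing) in one pass instead of A's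
-- six sequential passes over split-up lists (constant-factor speedup measured).

-- ===== PORT A =====
-- A-side helpers: the bodies of A's four accumulating loops, named
def pvAStep1 (acc : List String) (p : String) : List String :=
  if p ≠ "not out" then acc ++ [p] else acc

def pvAStep2 (acc : List String) (o : String) : List String :=
  match PySem.List.pyGet? ((PySem.Str.split? o "c ").getD []) 1 with
  | some x => acc ++ [x]
  | none   => acc ++ [(PySem.List.pyGet? ((PySem.Str.split? o "c ").getD []) 0).getD ""]

def pvAStep3 (acc : List String) (c : String) : List String :=
  acc ++ [(PySem.List.pyGet? ((PySem.Str.split? c "b ").getD []) 0).getD ""]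

def pvAStep4 (acc : List String) (b : String) : List String :=
  if PySem.Str.isIn "run out" b = false ∧ PySem.Str.isIn "lbw" b = false ∧ PySem.Str.isIn "and" b = false
  then acc ++ [b] else acc

def catches (battingInfo : List String) : List String :=
  let outInfo := battingInfo.foldl pvAStep1 ([] : List String)
  let removedC := outInfo.foldl pvAStep2 ([] : List String)
  let removedB := removedC.foldl pvAStep3 ([] : List String)
  let removedB' := removedB.map (fun b => PySem.Str.stripChars b " ")
  let catchesTakenBy := removedB'.foldl pvAStep4 ([] : List String)
  let c1 := catchesTakenBy.filter (fun x => x ≠ "")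
  let c2 := c1.filter (fun x => 1 < PySem.Str.len x)
  c2.map (fun x => PySem.Str.replace x "(sub)" "")

-- ===== PORT B =====
-- B-side helper: the body of B's single loop (find/slice index arithmetic, no split lists)
def pvBStep (out : List String) (p : String) : List String :=
  if p = "not out" then out
  else
    let i := PySem.Str.find p "c "
    let s1 := if 0 ≤ i then PySem.Str.slice p (some (i + 2)) none else p
    let j := PySem.Str.find s1 "c "
    let s2 := if 0 ≤ j then PySem.Str.slice s1 none (some j) else s1
    let k := PySem.Str.find s2 "b "
    let s3 := if 0 ≤ k then PySem.Str.slice s2 none (some k) else s2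
    let s := PySem.Str.stripChars s3 " "
    if PySem.Str.isIn "run out" s || PySem.Str.isIn "lbw" s || PySem.Str.isIn "and" s
       || decide (PySem.Str.len s ≤ 1)
    then out
    else out ++ [PySem.Str.replace s "(sub)" ""]

def catches_alt (battingInfo : List String) : List String :=
  battingInfo.foldl pvBStep ([] : List String)

-- ===== PRECONDITION & SPEC =====
def Spec_catches (battingInfo : List String) (out : List String) : Prop := out = catches_alt battingInfo
instance (battingInfo : List String) (out : List String) : Decidable (Spec_catches battingInfo out) := by unfold Spec_catches; infer_instance

-- ===== CLAIM (what is proved, stated in full; the proofs are below) =====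
def Claim_equal_catches : Prop := ∀ (battingInfo : List String), Dom_catches battingInfo → Spec_catches battingInfo (catches battingInfo)

-- ===== LEMMAS AND PROOFS =====

-- the per-entry cleaning pipeline A computes, as option-valued stages
def pvS1 (p : String) : Option String := if p = "not out" then none else some p

def pvG1 (o : String) : String :=
  match PySem.List.pyGet? ((PySem.Str.split? o "c ").getD []) 1 with
  | some x => x
  | none   => (PySem.List.pyGet? ((PySem.Str.split? o "c ").getD []) 0).getD ""

def pvG2 (c : String) : String := (PySem.List.pyGet? ((PySem.Str.split? c "b ").getD []) 0).getD ""

def pvS4 (b : String) : Option String :=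
  if PySem.Str.isIn "run out" b = false ∧ PySem.Str.isIn "lbw" b = false ∧ PySem.Str.isIn "and" b = false
  then some b else none

def pvClean (p : String) : String := PySem.Str.stripChars (pvG2 (pvG1 p)) " "

def pvKeep (s : String) : Bool :=
  !(PySem.Str.isIn "run out" s) && (!(PySem.Str.isIn "lbw" s) && (!(PySem.Str.isIn "and" s)
    && decide (1 < PySem.Str.len s)))

def pvF (p : String) : Option String :=
  if p = "not out" then none
  else if pvKeep (pvClean p) then some (PySem.Str.replace (pvClean p) "(sub)" "") else none

lemma pv_len_ne_empty (x : String) (h : 1 < PySem.Str.len x) : x ≠ "" := by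
  intro he; subst he; simp [PySem.Str.len_eq] at h

lemma pv_bool_cond (a b c d : Bool) : (a || b || c || !d) = !(!a && (!b && (!c && d))) := by
  cases a <;> cases b <;> cases c <;> cases d <;> rfl

-- an accumulating loop whose step appends (g x).toList is the filterMap of g
lemma pv_foldl_opt {f : List String → String → List String} (g : String → Option String)
    (hf : ∀ acc x, f acc x = acc ++ (g x).toList) (l : List String) (acc : List String) :
    l.foldl f acc = acc ++ l.filterMap g := by
  induction l generalizing acc with
  | nil => simp
  | cons x t ih =>
    rw [List.foldl_cons, hf, List.filterMap_cons]
    cases hgx : g x <;> simp [ih]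

lemma pv_hstep1 : ∀ (acc : List String) (p : String), pvAStep1 acc p = acc ++ (pvS1 p).toList := by
  intro acc p
  by_cases hp : p = "not out" <;> simp [pvAStep1, pvS1, hp]

lemma pv_hstep2 : ∀ (acc : List String) (o : String), pvAStep2 acc o = acc ++ ((fun o => some (pvG1 o)) o).toList := by
  intro acc o
  cases hx : PySem.List.pyGet? ((PySem.Str.split? o "c ").getD []) 1 <;>
    simp [pvAStep2, pvG1, hx]

lemma pv_hstep3 : ∀ (acc : List String) (c : String), pvAStep3 acc c = acc ++ ((fun c => some (pvG2 c)) c).toList := by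
  intro acc c
  simp [pvAStep3, pvG2]

lemma pv_hstep4 : ∀ (acc : List String) (b : String), pvAStep4 acc b = acc ++ (pvS4 b).toList := by
  intro acc b
  unfold pvAStep4 pvS4
  by_cases h : PySem.Str.isIn "run out" b = false ∧ PySem.Str.isIn "lbw" b = false ∧ PySem.Str.isIn "and" b = false
  · rw [if_pos h, if_pos h]; simp
  · rw [if_neg h, if_neg h]; simp

-- A's six stages, composed, are the filterMap of pvF
lemma pv_chain (l : List String) :
    List.map (fun x => PySem.Str.replace x "(sub)" "")
      (List.filter (fun x => 1 < PySem.Str.len x)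
        (List.filter (fun x => x ≠ "")
          (List.foldl pvAStep4 ([] : List String)
            (List.map (fun b => PySem.Str.stripChars b " ")
              (List.filterMap (fun c => some (pvG2 c))
                (List.filterMap (fun o => some (pvG1 o)) (List.filterMap pvS1 l)))))))
    = l.filterMap pvF := by
  rw [pv_foldl_opt pvS4 pv_hstep4, List.nil_append]
  induction l with
  | nil => simp
  | cons p t ih =>
    by_cases hp : p = "not out"
    · have h1 : pvS1 p = none := by unfold pvS1; rw [if_pos hp]
      have h2 : pvF p = none := by unfold pvF; rw [if_pos hp]
      rw [List.filterMap_cons_none h1, List.filterMap_cons_none h2]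
      exact ih
    · have h1 : pvS1 p = some p := by unfold pvS1; rw [if_neg hp]
      rw [List.filterMap_cons_some h1,
          List.filterMap_cons_some (f := fun o => some (pvG1 o)) (b := pvG1 p) rfl,
          List.filterMap_cons_some (f := fun c => some (pvG2 c)) (b := pvG2 (pvG1 p)) rfl,
          List.map_cons,
          show PySem.Str.stripChars (pvG2 (pvG1 p)) " " = pvClean p from rfl]
      by_cases h4 : PySem.Str.isIn "run out" (pvClean p) = false ∧
          PySem.Str.isIn "lbw" (pvClean p) = false ∧ PySem.Str.isIn "and" (pvClean p) = false
      · have hS4 : pvS4 (pvClean p) = some (pvClean p) := by unfold pvS4; rw [if_pos h4]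
        rw [List.filterMap_cons_some hS4]
        by_cases hlen : 1 < PySem.Str.len (pvClean p)
        · have hne : pvClean p ≠ "" := pv_len_ne_empty _ hlen
          have hk : pvKeep (pvClean p) = true := by
            unfold pvKeep; rw [h4.1, h4.2.1, h4.2.2, decide_eq_true hlen]; decide
          have hF : pvF p = some (PySem.Str.replace (pvClean p) "(sub)" "") := by
            unfold pvF; rw [if_neg hp, if_pos hk]
          rw [List.filterMap_cons_some hF]
          rw [List.filter_cons, decide_eq_true hne, if_pos rfl]
          rw [List.filter_cons, decide_eq_true hlen, if_pos rfl]
          rw [List.map_cons, ih]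
        · have hk : pvKeep (pvClean p) = false := by
            unfold pvKeep
            rw [decide_eq_false hlen]
            simp
          have hF : pvF p = none := by
            unfold pvF; rw [if_neg hp, if_neg (by rw [hk]; exact Bool.false_ne_true)]
          rw [List.filterMap_cons_none hF]
          by_cases hne : pvClean p = ""
          · rw [List.filter_cons, decide_eq_false (fun hc => hc hne), if_neg Bool.false_ne_true, ih]
          · rw [List.filter_cons, decide_eq_true hne, if_pos rfl]
            rw [List.filter_cons, decide_eq_false hlen, if_neg Bool.false_ne_true, ih]
      · have hS4 : pvS4 (pvClean p) = none := by unfold pvS4; rw [if_neg h4]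
        have hk : pvKeep (pvClean p) = false := by
          unfold pvKeep
          by_cases hA : PySem.Str.isIn "run out" (pvClean p) = true
          · rw [hA, show (!true) = false from rfl]
            simp only [Bool.false_and]
          · have hA' : PySem.Str.isIn "run out" (pvClean p) = false := by
              revert hA; cases PySem.Str.isIn "run out" (pvClean p) <;> simp
            by_cases hB : PySem.Str.isIn "lbw" (pvClean p) = true
            · rw [hB, show (!true) = false from rfl]
              simp only [Bool.false_and, Bool.and_false]
            · have hB' : PySem.Str.isIn "lbw" (pvClean p) = false := by
                revert hB; cases PySem.Str.isIn "lbw" (pvClean p) <;> simp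
              by_cases hC : PySem.Str.isIn "and" (pvClean p) = true
              · rw [hC, show (!true) = false from rfl]
                simp only [Bool.false_and, Bool.and_false]
              · have hC' : PySem.Str.isIn "and" (pvClean p) = false := by
                  revert hC; cases PySem.Str.isIn "and" (pvClean p) <;> simp
                exact absurd ⟨hA', hB', hC'⟩ h4
        have hF : pvF p = none := by
          unfold pvF; rw [if_neg hp, if_neg (by rw [hk]; exact Bool.false_ne_true)]
        rw [List.filterMap_cons_none hS4, List.filterMap_cons_none hF, ih]

lemma pv_a_eq (l : List String) : catches l = l.filterMap pvF := by
  show List.map (fun x => PySem.Str.replace x "(sub)" "")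
      (List.filter (fun x => 1 < PySem.Str.len x)
        (List.filter (fun x => x ≠ "")
          (List.foldl pvAStep4 ([] : List String)
            (List.map (fun b => PySem.Str.stripChars b " ")
              (List.foldl pvAStep3 ([] : List String)
                (List.foldl pvAStep2 ([] : List String)
                  (List.foldl pvAStep1 ([] : List String) l)))))))
    = l.filterMap pvF
  rw [pv_foldl_opt pvS1 pv_hstep1, pv_foldl_opt (fun o => some (pvG1 o)) pv_hstep2,
      pv_foldl_opt (fun c => some (pvG2 c)) pv_hstep3]
  simp only [List.nil_append]
  exact pv_chain l

-- ===== the find/splitOn theory relating B's index arithmetic to A's split lists =====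

-- find.go only shifts its result by the start offset
lemma pv_findgo_shift (sub : List Char) (l : List Char) :
    ∀ k : Nat, PySem.Chars.find.go sub l k =
      if PySem.Chars.find.go sub l 0 = -1 then -1 else PySem.Chars.find.go sub l 0 + k := by
  induction l with
  | nil =>
    intro k
    by_cases he : sub.isEmpty <;> simp [PySem.Chars.find.go, he]
  | cons c t ih =>
    intro k
    by_cases hpre : sub.isPrefixOf (c :: t)
    · simp [PySem.Chars.find.go, hpre]
    · have h1 : ∀ m : Nat, PySem.Chars.find.go sub (c :: t) m = PySem.Chars.find.go sub t (m + 1) := by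
        intro m; simp [PySem.Chars.find.go, hpre]
      rw [h1 k, h1 0, ih (k + 1), ih 1]
      by_cases h0 : PySem.Chars.find.go sub t 0 = -1
      · simp [h0]
      · have hge : 0 ≤ PySem.Chars.find.go sub t 0 := by
          have := PySem.Chars.neg_one_le_find t sub
          simp only [PySem.Chars.find] at this
          omega
        rw [if_neg h0, if_neg h0, if_neg (by omega), ]
        push_cast
        omega

-- one unfolding step of find on a cons cell
lemma pv_find_cons (sub : List Char) (c : Char) (t : List Char) :
    PySem.Chars.find (c :: t) sub =
      if sub.isPrefixOf (c :: t) then 0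
      else if PySem.Chars.find t sub = -1 then -1 else PySem.Chars.find t sub + 1 := by
  by_cases hpre : sub.isPrefixOf (c :: t)
  · simp [PySem.Chars.find, PySem.Chars.find.go, hpre]
  · rw [if_neg hpre]
    show PySem.Chars.find.go sub (c :: t) 0 = _
    have : PySem.Chars.find.go sub (c :: t) 0 = PySem.Chars.find.go sub t 1 := by
      simp [PySem.Chars.find.go, hpre]
    rw [this, pv_findgo_shift sub t 1]
    rfl

-- a found separator fits inside the string
lemma pv_find_bound (cs sep : List Char) (h : PySem.Chars.find cs sep ≠ -1) :
    (PySem.Chars.find cs sep).toNat + sep.length ≤ cs.length := by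
  have hge : 0 ≤ PySem.Chars.find cs sep := by
    have := PySem.Chars.neg_one_le_find cs sep; omega
  have hsp := (PySem.Chars.find_spec hge).1
  have hlen := hsp.length_le
  have hle := PySem.Chars.find_le_length cs sep
  simp [List.length_drop] at hlen
  omega

-- reference form of Python's str.split(sep): cut at the first occurrence, recurse on the rest
def pvRefSplit (sep cs : List Char) : List (List Char) :=
  if h : sep = [] ∨ PySem.Chars.find cs sep = -1 then [cs]
  else
    cs.take (PySem.Chars.find cs sep).toNat ::
      pvRefSplit sep (cs.drop ((PySem.Chars.find cs sep).toNat + sep.length))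
termination_by cs.length
decreasing_by
  push_neg at h
  have hb := pv_find_bound cs sep h.2
  have hs : sep.length ≠ 0 := fun hc => h.1 (List.eq_nil_of_length_eq_zero hc)
  simp [List.length_drop]
  omega

lemma pv_refSplit_ne_nil (sep cs : List Char) : pvRefSplit sep cs ≠ [] := by
  rw [pvRefSplit]
  split_ifs <;> simp

-- prepend pre to the first piece
def pvConsHead (pre : List Char) : List (List Char) → List (List Char)
  | [] => [pre]
  | h :: t => (pre ++ h) :: t

lemma pv_consHead_nil_id (R : List (List Char)) (h : R ≠ []) : pvConsHead [] R = R := by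
  cases R with
  | nil => exact absurd rfl h
  | cons a t => simp [pvConsHead]

lemma pv_refSplit_cons_not_prefix (sep : List Char) (c : Char) (t : List Char) (pre : List Char)
    (hsep : sep ≠ []) (hpre : ¬ sep.isPrefixOf (c :: t)) :
    pvConsHead pre (pvRefSplit sep (c :: t)) = pvConsHead (pre ++ [c]) (pvRefSplit sep t) := by
  have hf := pv_find_cons sep c t
  rw [if_neg hpre] at hf
  by_cases h0 : PySem.Chars.find t sep = -1
  · rw [h0, if_pos rfl] at hf
    rw [pvRefSplit, dif_pos (Or.inr hf), pvRefSplit, dif_pos (Or.inr h0)]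
    simp [pvConsHead]
  · rw [if_neg h0] at hf
    have hge : 0 ≤ PySem.Chars.find t sep := by
      have := PySem.Chars.neg_one_le_find t sep; omega
    have hne : PySem.Chars.find (c :: t) sep ≠ -1 := by rw [hf]; omega
    conv_lhs => rw [pvRefSplit, dif_neg (by push_neg; exact ⟨hsep, hne⟩)]
    conv_rhs => rw [pvRefSplit, dif_neg (by push_neg; exact ⟨hsep, h0⟩)]
    have htn : (PySem.Chars.find (c :: t) sep).toNat = (PySem.Chars.find t sep).toNat + 1 := by
      rw [hf]; omega
    rw [htn]
    have hdrop : List.drop ((PySem.Chars.find t sep).toNat + 1 + sep.length) (c :: t) =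
        List.drop ((PySem.Chars.find t sep).toNat + sep.length) t := by
      rw [show (PySem.Chars.find t sep).toNat + 1 + sep.length
            = ((PySem.Chars.find t sep).toNat + sep.length) + 1 from by omega,
          List.drop_succ_cons]
    simp only [List.take_succ_cons, hdrop]
    simp [pvConsHead]

lemma pv_go_spec (sep : List Char) (hsep : sep ≠ []) :
    ∀ (fuel : Nat) (cs cur : List Char) (acc : List (List Char)), cs.length < fuel →
      PySem.Chars.splitOn.go sep fuel cs cur acc =
        acc.reverse ++ pvConsHead cur.reverse (pvRefSplit sep cs) := by
  intro fuel
  induction fuel with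
  | zero => intro cs cur acc h; omega
  | succ n ih =>
    intro cs cur acc h
    cases cs with
    | nil =>
      have hf : PySem.Chars.find ([] : List Char) sep = -1 := by
        have : sep.isEmpty = false := by
          cases sep with
          | nil => exact absurd rfl hsep
          | cons a t => rfl
        simp [PySem.Chars.find, PySem.Chars.find.go, this]
      rw [pvRefSplit, dif_pos (Or.inr hf)]
      simp [PySem.Chars.splitOn.go, pvConsHead]
    | cons c t =>
      by_cases hpre : sep.isPrefixOf (c :: t)
      · have hstep : PySem.Chars.splitOn.go sep (n + 1) (c :: t) cur acc =
            PySem.Chars.splitOn.go sep n (List.drop sep.length (c :: t)) [] (cur.reverse :: acc) := by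
          simp [PySem.Chars.splitOn.go, hpre]
        have hf0 : PySem.Chars.find (c :: t) sep = 0 := by
          rw [pv_find_cons, if_pos hpre]
        have hslen : 1 ≤ sep.length := by
          cases sep with
          | nil => exact absurd rfl hsep
          | cons a t' => simp
        have hfuel : (List.drop sep.length (c :: t)).length < n := by
          simp [List.length_drop]
          simp at h
          omega
        rw [hstep, ih _ [] _ hfuel]
        conv_rhs => rw [pvRefSplit, dif_neg (by push_neg; exact ⟨hsep, by rw [hf0]; omega⟩)]
        rw [hf0]
        simp only [Int.toNat_zero, List.take_zero, Nat.zero_add]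
        simp only [List.reverse_nil]
        rw [pv_consHead_nil_id _ (pv_refSplit_ne_nil _ _)]
        simp [pvConsHead]
      · have hstep : PySem.Chars.splitOn.go sep (n + 1) (c :: t) cur acc =
            PySem.Chars.splitOn.go sep n t (c :: cur) acc := by
          simp [PySem.Chars.splitOn.go, hpre]
        have hfuel : t.length < n := by simp at h; omega
        rw [hstep, ih _ _ _ hfuel]
        rw [pv_refSplit_cons_not_prefix sep c t cur.reverse hsep hpre]
        simp

lemma pv_splitOn_eq (sep cs : List Char) (hsep : sep ≠ []) :
    PySem.Chars.splitOn cs sep = pvRefSplit sep cs := by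
  show PySem.Chars.splitOn.go sep (cs.length + 1) cs [] [] = _
  rw [pv_go_spec sep hsep (cs.length + 1) cs [] [] (by omega)]
  simp [pv_consHead_nil_id _ (pv_refSplit_ne_nil sep cs)]

-- Str.split? through pvRefSplit
lemma pv_strSplit (s sep : String) (hsep : sep.toList ≠ []) :
    (PySem.Str.split? s sep).getD [] = (pvRefSplit sep.toList s.toList).map String.ofList := by
  have : sep.toList.isEmpty = false := by
    cases hsl : sep.toList with
    | nil => exact absurd hsl hsep
    | cons a t => rfl
  simp [PySem.Str.split?, PySem.Chars.split?, this, pv_splitOn_eq _ _ hsep]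

-- head of a split = the part before the first separator, as B computes it with find/slice
lemma pv_head_stage (c sep : String) (hsep : sep.toList ≠ []) :
    (PySem.List.pyGet? ((PySem.Str.split? c sep).getD []) 0).getD "" =
      (if 0 ≤ PySem.Str.find c sep then PySem.Str.slice c none (some (PySem.Str.find c sep)) else c) := by
  rw [pv_strSplit c sep hsep]
  by_cases hf : PySem.Chars.find c.toList sep.toList = -1
  · rw [pvRefSplit, dif_pos (Or.inr hf)]
    have : ¬ (0 : Int) ≤ PySem.Str.find c sep := by
      show ¬ (0 : Int) ≤ PySem.Chars.find c.toList sep.toList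
      omega
    rw [if_neg this]
    simp [PySem.List.pyGet?, PySem.List.pyIdx?]
  · rw [pvRefSplit, dif_neg (by push_neg; exact ⟨fun h => hsep h, hf⟩)]
    have hge : (0 : Int) ≤ PySem.Chars.find c.toList sep.toList := by
      have := PySem.Chars.neg_one_le_find c.toList sep.toList; omega
    have hge' : (0 : Int) ≤ PySem.Str.find c sep := hge
    rw [if_pos hge']
    have hsl : (PySem.Str.slice c none (some (PySem.Str.find c sep))).toList =
        c.toList.take (PySem.Chars.find c.toList sep.toList).toNat := by
      rw [PySem.Str.toList_slice]
      simp [PySem.Chars.slice_eq_listSlice]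
      rw [PySem.List.slice_to _ hge]
    have : PySem.Str.slice c none (some (PySem.Str.find c sep)) =
        String.ofList (c.toList.take (PySem.Chars.find c.toList sep.toList).toNat) := by
      rw [← String.toList_inj, hsl]; simp
    rw [this]
    simp [PySem.List.pyGet?, PySem.List.pyIdx?]

-- the 'c '-stage: A's parts[1]-with-fallback equals B's find/slice pair
lemma pv_c_stage (p : String) :
    pvG1 p =
      (if 0 ≤ PySem.Str.find p "c "
       then (let s1 := PySem.Str.slice p (some (PySem.Str.find p "c " + 2)) none;
             if 0 ≤ PySem.Str.find s1 "c "
             then PySem.Str.slice s1 none (some (PySem.Str.find s1 "c ")) else s1)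
       else p) := by
  have hsep : ("c " : String).toList ≠ [] := by decide
  unfold pvG1
  rw [pv_strSplit p "c " hsep]
  by_cases hf : PySem.Chars.find p.toList ("c ").toList = -1
  · rw [pvRefSplit, dif_pos (Or.inr hf)]
    have hneg : ¬ (0 : Int) ≤ PySem.Str.find p "c " := by
      show ¬ (0 : Int) ≤ PySem.Chars.find p.toList ("c ").toList
      omega
    rw [if_neg hneg]
    simp [PySem.List.pyGet?, PySem.List.pyIdx?]
  · rw [pvRefSplit, dif_neg (by push_neg; exact ⟨fun h => hsep h, hf⟩)]
    have hge : (0 : Int) ≤ PySem.Chars.find p.toList ("c ").toList := by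
      have := PySem.Chars.neg_one_le_find p.toList ("c ").toList; omega
    have hge' : (0 : Int) ≤ PySem.Str.find p "c " := hge
    rw [if_pos hge']
    -- s1's char list is the remainder after the first 'c '
    have hs1 : (PySem.Str.slice p (some (PySem.Str.find p "c " + 2)) none).toList =
        p.toList.drop ((PySem.Chars.find p.toList ("c ").toList).toNat + ("c ").toList.length) := by
      rw [PySem.Str.toList_slice, PySem.Chars.slice_eq_listSlice,
          PySem.List.slice_from _ (show (0:Int) ≤ PySem.Str.find p "c " + 2 by
            have h0 : (0:Int) ≤ PySem.Str.find p "c " := hge'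
            omega)]
      congr 1
      show (PySem.Chars.find p.toList ("c ").toList + 2).toNat
            = (PySem.Chars.find p.toList ("c ").toList).toNat + ("c ").toList.length
      have h2 : ("c ").toList.length = 2 := rfl
      rw [h2]
      omega
    -- rewrite the let-bound s1 via the head-stage lemma on its list
    have hmain : ∀ (s1 : String),
        s1.toList = p.toList.drop ((PySem.Chars.find p.toList ("c ").toList).toNat + ("c ").toList.length) →
        (match PySem.List.pyGet?
            ((pvRefSplit ("c ").toList
              (p.toList.drop ((PySem.Chars.find p.toList ("c ").toList).toNat + ("c ").toList.length))).map (fun l => String.ofList l) |>.cons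
                (String.ofList (p.toList.take (PySem.Chars.find p.toList ("c ").toList).toNat))) 1 with
          | some x => x
          | none => (PySem.List.pyGet?
              ((pvRefSplit ("c ").toList
                (p.toList.drop ((PySem.Chars.find p.toList ("c ").toList).toNat + ("c ").toList.length))).map (fun l => String.ofList l) |>.cons
                  (String.ofList (p.toList.take (PySem.Chars.find p.toList ("c ").toList).toNat))) 0).getD "")
          = (if 0 ≤ PySem.Str.find s1 "c "
             then PySem.Str.slice s1 none (some (PySem.Str.find s1 "c ")) else s1) := by
      intro s1 hs1l
      set rest := p.toList.drop ((PySem.Chars.find p.toList ("c ").toList).toNat + ("c ").toList.length) with hrest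
      -- parts[1]? = head of the split of rest
      have hRne := pv_refSplit_ne_nil ("c ").toList rest
      cases hR : pvRefSplit ("c ").toList rest with
      | nil => exact absurd hR hRne
      | cons r0 rt =>
        have hget : PySem.List.pyGet?
            (((r0 :: rt).map (fun l => String.ofList l)).cons
              (String.ofList (p.toList.take (PySem.Chars.find p.toList ("c ").toList).toNat))) 1
            = some (String.ofList r0) := by
          simp [PySem.List.pyGet?, PySem.List.pyIdx?]
        rw [hget]
        -- now show ofList r0 = B's s2 from s1
        have hfind : PySem.Str.find s1 "c " = PySem.Chars.find rest ("c ").toList := by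
          show PySem.Chars.find s1.toList ("c ").toList = _
          rw [hs1l]
        by_cases hf2 : PySem.Chars.find rest ("c ").toList = -1
        · have hr0 : r0 = rest := by
            have := hR
            rw [pvRefSplit, dif_pos (Or.inr hf2)] at this
            exact (List.cons_eq_cons.mp this.symm).1
          have hneg : ¬ (0 : Int) ≤ PySem.Str.find s1 "c " := by rw [hfind]; omega
          rw [if_neg hneg, hr0, ← hs1l]
          simp
        · have hge2 : (0 : Int) ≤ PySem.Chars.find rest ("c ").toList := by
            have := PySem.Chars.neg_one_le_find rest ("c ").toList; omega
          have hr0 : r0 = rest.take (PySem.Chars.find rest ("c ").toList).toNat := by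
            have := hR
            rw [pvRefSplit, dif_neg (by push_neg; exact ⟨by decide, hf2⟩)] at this
            exact (List.cons_eq_cons.mp this.symm).1
          have hpos : (0 : Int) ≤ PySem.Str.find s1 "c " := by rw [hfind]; omega
          rw [if_pos hpos, hr0]
          have : (PySem.Str.slice s1 none (some (PySem.Str.find s1 "c "))).toList =
              rest.take (PySem.Chars.find rest ("c ").toList).toNat := by
            rw [PySem.Str.toList_slice, PySem.Chars.slice_eq_listSlice,
                PySem.List.slice_to _ hpos, hs1l, hfind]
          rw [← String.toList_inj, this]
          simp
    simpa using hmain _ hs1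
-- end pv_c_stage

-- B's per-entry step appends (pvF p).toList, i.e. computes A's pipeline value
lemma pv_hstepB : ∀ (out : List String) (p : String), pvBStep out p = out ++ (pvF p).toList := by
  intro out p
  by_cases hp : p = "not out"
  · have hF : pvF p = none := by unfold pvF; rw [if_pos hp]
    unfold pvBStep
    rw [if_pos hp, hF]
    simp
  · simp only [pvBStep]
    rw [if_neg hp]
    have hsepB : ("b " : String).toList ≠ [] := by decide
    -- fold B's three stages into pvClean
    have hclean :
        PySem.Str.stripChars
          (let i := PySem.Str.find p "c "
           let s1 := if 0 ≤ i then PySem.Str.slice p (some (i + 2)) none else p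
           let j := PySem.Str.find s1 "c "
           let s2 := if 0 ≤ j then PySem.Str.slice s1 none (some j) else s1
           let k := PySem.Str.find s2 "b "
           if 0 ≤ k then PySem.Str.slice s2 none (some k) else s2) " " = pvClean p := by
      unfold pvClean
      congr 1
      rw [pv_c_stage p]
      by_cases hi : 0 ≤ PySem.Str.find p "c "
      · simp only [hi, if_pos]
        rw [pvG2, pv_head_stage _ "b " hsepB]
      · simp only [if_neg hi]
        rw [pvG2, pv_head_stage _ "b " hsepB]
    rw [hclean]
    have hdec : decide (PySem.Str.len (pvClean p) ≤ 1) = !decide (1 < PySem.Str.len (pvClean p)) := by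
      generalize PySem.Str.len (pvClean p) = n
      by_cases h : 1 < n
      · rw [decide_eq_false (by omega : ¬ (n ≤ 1)), decide_eq_true h]; rfl
      · rw [decide_eq_true (by omega : n ≤ 1), decide_eq_false h]; rfl
    rw [hdec, pv_bool_cond]
    rw [show (!(PySem.Str.isIn "run out" (pvClean p)) && (!(PySem.Str.isIn "lbw" (pvClean p)) &&
          (!(PySem.Str.isIn "and" (pvClean p)) && decide (1 < PySem.Str.len (pvClean p)))))
        = pvKeep (pvClean p) from rfl]
    by_cases hk : pvKeep (pvClean p) = true
    · have hF : pvF p = some (PySem.Str.replace (pvClean p) "(sub)" "") := by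
        unfold pvF; rw [if_neg hp, if_pos hk]
      rw [hk, hF]; simp
    · have hk' : pvKeep (pvClean p) = false := by
        revert hk; cases pvKeep (pvClean p) <;> simp
      have hF : pvF p = none := by unfold pvF; rw [if_neg hp, if_neg hk]
      rw [hk', hF]; simp

lemma pv_alt_eq (l : List String) : catches_alt l = l.filterMap pvF := by
  unfold catches_alt
  rw [pv_foldl_opt pvF pv_hstepB, List.nil_append]

-- ===== VERDICT (by name: the statement is the Claim_ definition above) =====
theorem catches_spec : Claim_equal_catches := by
  intro l _hdom
  unfold Spec_catches
  rw [pv_a_eq, pv_alt_eq]
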